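-- pv_equiv track=rewrite | github.com/pabello/ai_master_csit | lab01_salesman/brute_force.py | get_best_solutions_list
-- ===== SOURCE A (Python) =====
-- def get_best_solutions_list(solutions: list):
--     sorted_solutions = sorted(solutions, key=lambda x: x[1])
--     lowest_cost = sorted_solutions[0][1]
--     best_solutions = []
--     for solution in sorted_solutions:
--         if solution[1] == lowest_cost:
--             best_solutions.append(solution)
--         else:
--             break
--     return best_solutions
-- ===== SOURCE B (Python) =====
-- def get_best_solutions_list(solutions: list):
--     lowest_cost = min(solution[1] for solution in solutions)
--     return [solution for solution in solutions if solution[1] == lowest_cost]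
-- ===== Notes on version B (the rewrite author's own statement) =====
-- stated objective: simpler
-- what changed: Replaces A's sort-then-take-equal-prefix with a single min pass over the costs followed by one filter pass, removing the sort entirely (measured only ~1.3x at the largest size, so no speed claim).
import Mathlib
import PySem

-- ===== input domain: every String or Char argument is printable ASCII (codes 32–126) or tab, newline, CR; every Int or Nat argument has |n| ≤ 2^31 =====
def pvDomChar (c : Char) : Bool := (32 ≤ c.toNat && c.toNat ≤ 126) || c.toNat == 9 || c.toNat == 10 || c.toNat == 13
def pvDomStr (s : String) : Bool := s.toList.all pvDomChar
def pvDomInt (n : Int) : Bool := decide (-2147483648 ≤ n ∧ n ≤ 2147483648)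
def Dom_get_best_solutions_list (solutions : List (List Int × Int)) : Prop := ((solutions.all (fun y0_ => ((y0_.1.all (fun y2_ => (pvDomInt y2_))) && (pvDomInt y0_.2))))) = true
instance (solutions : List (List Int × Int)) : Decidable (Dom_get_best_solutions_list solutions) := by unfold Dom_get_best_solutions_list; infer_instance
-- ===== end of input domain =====

-- B replaces A's sort-then-take-prefix with one min pass plus one filter pass (no sort);
-- equivalence is proved on non-empty input (both raise on []).

-- ===== PORT A =====
-- A's for-loop with break: append while the cost equals lowest_cost, stop at the first other cost.
def pvLoopA (lowest : Int) : List (List Int × Int) → List (List Int × Int)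
  | [] => []
  | s :: rest => if s.2 = lowest then s :: pvLoopA lowest rest else []

def get_best_solutions_list (solutions : List (List Int × Int)) : List (List Int × Int) :=
  let sorted_solutions := PySem.List.sorted solutions (fun x => x.2)
  match PySem.List.pyGet? sorted_solutions 0 with
  | none => []    -- unreachable under Pre_: Python raises IndexError on []
  | some first => pvLoopA first.2 sorted_solutions

-- ===== PORT B =====
def get_best_solutions_list_alt (solutions : List (List Int × Int)) : List (List Int × Int) :=
  match PySem.List.min? (solutions.map (fun s => s.2)) (fun c => c) with
  | none => []    -- unreachable under Pre_: Python's min raises ValueError on an empty generator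
  | some lowest_cost => solutions.filter (fun s => s.2 = lowest_cost)

-- ===== PRECONDITION & SPEC =====
-- Pre_ excludes only the empty list, on which both A (IndexError) and B (ValueError) raise.
def Pre_get_best_solutions_list (solutions : List (List Int × Int)) : Prop := solutions ≠ []
instance (solutions : List (List Int × Int)) : Decidable (Pre_get_best_solutions_list solutions) := by unfold Pre_get_best_solutions_list; infer_instance
def pvWitness_get_best_solutions_list : (List (List Int × Int)) := [([1, 2], 5), ([2, 1], 5), ([0], 7)]

def Spec_get_best_solutions_list (solutions : List (List Int × Int)) (out : List (List Int × Int)) : Prop := out = get_best_solutions_list_alt solutions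
instance (solutions : List (List Int × Int)) (out : List (List Int × Int)) : Decidable (Spec_get_best_solutions_list solutions out) := by unfold Spec_get_best_solutions_list; infer_instance

-- ===== CLAIM (what is proved, stated in full; the proofs are below) =====
def Claim_equal_get_best_solutions_list : Prop := ∀ (solutions : List (List Int × Int)), Dom_get_best_solutions_list solutions → Pre_get_best_solutions_list solutions → Spec_get_best_solutions_list solutions (get_best_solutions_list solutions)

-- ===== LEMMAS AND PROOFS =====

-- A's break-loop, run on a key-sorted list whose minimal cost is m, keeps exactly the cost-m elements.
theorem pvLoopA_eq_filter (m : Int) (l : List (List Int × Int))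
    (hp : l.Pairwise (fun a b => a.2 ≤ b.2)) (hm : ∀ y ∈ l, m ≤ y.2) :
    pvLoopA m l = l.filter (fun s => s.2 = m) := by
  induction l with
  | nil => rfl
  | cons s rest ih =>
    rcases List.pairwise_cons.mp hp with ⟨hs, hrest⟩
    by_cases h : s.2 = m
    · simp [pvLoopA, h, ih hrest (fun y hy => hm y (List.mem_cons_of_mem _ hy))]
    · have hms : m < s.2 := lt_of_le_of_ne (hm s (List.mem_cons_self)) (fun e => h e.symm)
      have : rest.filter (fun s => s.2 = m) = [] := by
        refine List.filter_eq_nil_iff.mpr (fun y hy => ?_)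
        have : m < y.2 := lt_of_lt_of_le hms (hs y hy)
        simp; omega
      simp [pvLoopA, h, this]

-- stability: inserting x into a list whose costs are all ≥ m appends x to the cost-m block
theorem filter_insertBy (m : Int) (x : List Int × Int) (acc : List (List Int × Int))
    (hp : acc.Pairwise (fun a b => a.2 ≤ b.2)) (hm : ∀ y ∈ acc, m ≤ y.2) :
    (PySem.List.insertBy (fun a b => decide (a.2 < b.2)) x acc).filter (fun s => s.2 = m)
      = acc.filter (fun s => s.2 = m) ++ (if x.2 = m then [x] else []) := by
  induction acc with
  | nil => by_cases h : x.2 = m <;> simp [PySem.List.insertBy, h]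
  | cons y ys ih =>
    rcases List.pairwise_cons.mp hp with ⟨hy, hys⟩
    by_cases hlt : x.2 < y.2
    · have hrw : PySem.List.insertBy (fun a b => decide (a.2 < b.2)) x (y :: ys) = x :: y :: ys := by
        simp [PySem.List.insertBy, hlt]
      rw [hrw]
      by_cases hx : x.2 = m
      · have hym : m < y.2 := hx ▸ hlt
        have hnil : (y :: ys).filter (fun s : List Int × Int => s.2 = m) = [] := by
          refine List.filter_eq_nil_iff.mpr (fun z hz => ?_)
          have : m < z.2 := by
            rcases List.mem_cons.mp hz with rfl | hz'
            · exact hym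
            · exact lt_of_lt_of_le hym (hy z hz')
          simp; omega
        have h2 : List.filter (fun s : List Int × Int => decide (s.2 = m)) ys = [] :=
          List.filter_eq_nil_iff.mpr fun z hz => (List.filter_eq_nil_iff.mp hnil) z (List.mem_cons_of_mem _ hz)
        simp [hx, h2, (List.filter_eq_nil_iff.mp hnil) y List.mem_cons_self]
      · simp [List.filter_cons, hx]
    · have hrw : PySem.List.insertBy (fun a b => decide (a.2 < b.2)) x (y :: ys)
          = y :: PySem.List.insertBy (fun a b => decide (a.2 < b.2)) x ys := by
        simp [PySem.List.insertBy, hlt]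
      rw [hrw]
      have hthis := ih hys (fun z hz => hm z (List.mem_cons_of_mem _ hz))
      by_cases hyv : y.2 = m <;> simp [hyv, hthis]

-- insertion into a cost-sorted list keeps it cost-sorted
theorem pairwise_insertBy (x : List Int × Int) (acc : List (List Int × Int))
    (hp : acc.Pairwise (fun a b => a.2 ≤ b.2)) :
    (PySem.List.insertBy (fun a b => decide (a.2 < b.2)) x acc).Pairwise (fun a b => a.2 ≤ b.2) := by
  induction acc with
  | nil => simp [PySem.List.insertBy]
  | cons y ys ih =>
    rcases List.pairwise_cons.mp hp with ⟨hy, hys⟩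
    by_cases hlt : x.2 < y.2
    · simp only [PySem.List.insertBy, hlt, decide_true, if_true]
      refine List.pairwise_cons.mpr ⟨?_, hp⟩
      intro z hz
      rcases List.mem_cons.mp hz with rfl | hz'
      · exact hlt.le
      · exact hlt.le.trans (hy z hz')
    · simp only [PySem.List.insertBy, hlt, decide_false]
      refine List.pairwise_cons.mpr ⟨?_, ih hys⟩
      intro z hz
      rcases (PySem.List.mem_insertBy _ x z ys).mp hz with hzx | hz'
      · rw [hzx]; omega
      · exact hy z hz'

-- the insertion-sort fold preserves the cost-m sublist in its original order
theorem filter_foldl_insertBy (m : Int) (xs acc : List (List Int × Int))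
    (hp : acc.Pairwise (fun a b => a.2 ≤ b.2)) (hm : ∀ y ∈ acc, m ≤ y.2)
    (hmx : ∀ y ∈ xs, m ≤ y.2) :
    (xs.foldl (fun acc x => PySem.List.insertBy (fun a b => decide (a.2 < b.2)) x acc) acc).filter (fun s => s.2 = m)
      = acc.filter (fun s => s.2 = m) ++ xs.filter (fun s => s.2 = m) := by
  induction xs generalizing acc with
  | nil => simp
  | cons x t ih =>
    have hmx' : ∀ y ∈ t, m ≤ y.2 := fun y hy => hmx y (List.mem_cons_of_mem _ hy)
    have hmacc' : ∀ y ∈ PySem.List.insertBy (fun a b => decide (a.2 < b.2)) x acc, m ≤ y.2 := by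
      intro z hz
      rcases (PySem.List.mem_insertBy _ x z acc).mp hz with hzx | hz'
      · rw [hzx]; exact hmx x List.mem_cons_self
      · exact hm z hz'
    have step := filter_insertBy m x acc hp hm
    simp only [List.foldl_cons]
    rw [ih _ (pairwise_insertBy x acc hp) hmacc' hmx', step]
    by_cases hx : x.2 = m <;> simp [hx]

theorem filter_sorted_eq (m : Int) (xs : List (List Int × Int)) (hmx : ∀ y ∈ xs, m ≤ y.2) :
    (PySem.List.sorted xs (fun x => x.2)).filter (fun s => s.2 = m) = xs.filter (fun s => s.2 = m) := by
  rw [PySem.List.sorted_eq_foldl_insertBy]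
  simpa using filter_foldl_insertBy m xs [] (by simp) (by simp) hmx

-- ===== VERDICT (by name: the statement is the Claim_ definition above) =====
theorem get_best_solutions_list_spec : Claim_equal_get_best_solutions_list := by
  intro solutions _ hne
  unfold Spec_get_best_solutions_list get_best_solutions_list get_best_solutions_list_alt
  obtain ⟨h, t, hsrt⟩ : ∃ h t, PySem.List.sorted solutions (fun x => x.2) = h :: t := by
    rcases hs : PySem.List.sorted solutions (fun x => x.2) with _ | ⟨h, t⟩
    · exfalso
      have hperm := PySem.List.sorted_perm solutions (fun x : List Int × Int => x.2) false
      rw [hs] at hperm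
      exact hne (List.Perm.eq_nil hperm.symm)
    · exact ⟨h, t, rfl⟩
  obtain ⟨s0, rest, hcons⟩ : ∃ s0 rest, solutions = s0 :: rest := by
    rcases solutions with _ | ⟨s0, rest⟩
    · exact absurd rfl hne
    · exact ⟨s0, rest, rfl⟩
  obtain ⟨m, hmin⟩ : ∃ m, PySem.List.min? (solutions.map (fun s => s.2)) (fun c => c) = some m := by
    rw [hcons, List.map_cons]
    exact ⟨_, PySem.List.min?_id_cons s0.2 (rest.map (fun s => s.2))⟩
  -- the head of the sorted list carries the minimal cost m
  have hhm : h.2 = m := by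
    have h1 : ∀ y ∈ solutions, h.2 ≤ y.2 := PySem.List.key_head_sorted_le solutions _ hsrt
    have hmem : m ∈ solutions.map (fun s => s.2) := PySem.List.min?_mem hmin
    rcases List.mem_map.mp hmem with ⟨y, hy, hym⟩
    have h2 : ∀ c ∈ solutions.map (fun s => s.2), m ≤ c := PySem.List.min?_isMin hmin
    have hhmem : h ∈ solutions := by
      have : h ∈ PySem.List.sorted solutions (fun x => x.2) := by simp [hsrt]
      exact (PySem.List.mem_sorted _ _ _ _).mp this
    have := h2 h.2 (List.mem_map.mpr ⟨h, hhmem, rfl⟩)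
    have := h1 y hy
    omega
  have hmx : ∀ y ∈ solutions, m ≤ y.2 := fun y hy =>
    PySem.List.min?_isMin hmin y.2 (List.mem_map.mpr ⟨y, hy, rfl⟩)
  have hmx' : ∀ y ∈ (h :: t), m ≤ y.2 := by
    intro y hy
    exact hmx y ((PySem.List.mem_sorted _ _ _ _).mp (hsrt ▸ hy))
  have hget : PySem.List.pyGet? (h :: t) 0 = some h := by
    simp [PySem.List.pyGet?, PySem.List.pyIdx?]
  have hpw : (h :: t).Pairwise (fun a b : List Int × Int => a.2 ≤ b.2) := by
    rw [← hsrt]; exact PySem.List.sorted_pairwise solutions _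
  simp only [hsrt, hmin, hget]
  rw [hhm, pvLoopA_eq_filter m (h :: t) hpw hmx', ← hsrt, filter_sorted_eq m solutions hmx]
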